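-- pv_equiv track=rewrite | github.com/diskind1/Mego | python/exercises/ex2/main.py | Q3SummerB2021
-- ===== SOURCE A (Python) =====
-- def Q3SummerB2021(s1, s2):
--     if(len(s1)%len(s2)!=0):
--         return False
--     a=0
--     while(a<len(s1)//len(s2)):
--         b=0
--         while(b<len(s2)):
--             if(s1[a*(len(s2))+b]!=s2[b]):
--                 return False
--             b+=1
--         a+=1
--     return True
-- ===== SOURCE B (Python) =====
-- def Q3SummerB2021(s1, s2):
--     k = len(s1) // len(s2)
--     return s1 == s2 * k
-- ===== Notes on version B (the rewrite author's own statement) =====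
-- stated objective: idiomatic
-- what changed: Replaces the explicit nested index loops with a single comparison against s2 repeated len(s1)//len(s2) times (string multiplication + one equality), moving all per-character work to C-level string operations.
import Mathlib
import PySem

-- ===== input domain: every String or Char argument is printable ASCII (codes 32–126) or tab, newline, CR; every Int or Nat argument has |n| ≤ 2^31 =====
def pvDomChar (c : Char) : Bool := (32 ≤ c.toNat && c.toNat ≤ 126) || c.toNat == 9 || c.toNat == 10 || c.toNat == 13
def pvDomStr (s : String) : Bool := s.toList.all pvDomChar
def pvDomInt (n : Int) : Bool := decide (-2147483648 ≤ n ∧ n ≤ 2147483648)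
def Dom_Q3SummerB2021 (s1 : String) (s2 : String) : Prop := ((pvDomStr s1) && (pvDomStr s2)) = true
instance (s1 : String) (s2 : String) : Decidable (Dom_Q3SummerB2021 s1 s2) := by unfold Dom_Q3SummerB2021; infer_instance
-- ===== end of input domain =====

-- B replaces A's explicit nested index loops by one comparison with s2 repeated
-- len(s1)//len(s2) times (idiomatic; same asymptotic cost).

-- ===== PORT A =====
-- inner `while b < len(s2)` loop of A: returns false on the first mismatch
def pvInnerA (l1 l2 : List Char) (a : Nat) (b : Nat) : Bool :=
  if _h : b < l2.length then
    if PySem.List.pyGet? l1 ((a * l2.length + b : Nat) : Int)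
         ≠ PySem.List.pyGet? l2 ((b : Nat) : Int) then false
    else pvInnerA l1 l2 a (b + 1)
  else true
termination_by l2.length - b

-- outer `while a < len(s1)//len(s2)` loop of A
def pvOuterA (l1 l2 : List Char) (a : Nat) : Bool :=
  if _h : a < l1.length / l2.length then
    if pvInnerA l1 l2 a 0 = false then false
    else pvOuterA l1 l2 (a + 1)
  else true
termination_by l1.length / l2.length - a

def Q3SummerB2021 (s1 : String) (s2 : String) : Bool :=
  let l1 := s1.toList
  let l2 := s2.toList
  if l1.length % l2.length ≠ 0 then false
  else pvOuterA l1 l2 0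

-- ===== PORT B =====
def Q3SummerB2021_alt (s1 : String) (s2 : String) : Bool :=
  let k := s1.toList.length / s2.toList.length
  s1.toList == (List.replicate k s2.toList).flatten

-- ===== PRECONDITION & SPEC =====
-- A (and B alike) raises ZeroDivisionError when s2 is empty; exactly those inputs are excluded.
def Pre_Q3SummerB2021 (s1 : String) (s2 : String) : Prop := s2 ≠ ""
instance (s1 : String) (s2 : String) : Decidable (Pre_Q3SummerB2021 s1 s2) := by
  unfold Pre_Q3SummerB2021; infer_instance
def pvWitness_Q3SummerB2021 : String × String := ("abab", "ab")

def Spec_Q3SummerB2021 (s1 : String) (s2 : String) (out : Bool) : Prop := out = Q3SummerB2021_alt s1 s2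
instance (s1 : String) (s2 : String) (out : Bool) : Decidable (Spec_Q3SummerB2021 s1 s2 out) := by unfold Spec_Q3SummerB2021; infer_instance

-- ===== CLAIM (what is proved, stated in full; the proofs are below) =====
def Claim_equal_Q3SummerB2021 : Prop := ∀ (s1 : String) (s2 : String), Dom_Q3SummerB2021 s1 s2 → Pre_Q3SummerB2021 s1 s2 → Spec_Q3SummerB2021 s1 s2 (Q3SummerB2021 s1 s2)

-- ===== LEMMAS AND PROOFS =====

-- characterisation of the inner loop
theorem pvInnerA_iff (l1 l2 : List Char) (a b : Nat) :
    pvInnerA l1 l2 a b = true ↔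
      ∀ j, b ≤ j → j < l2.length → l1[a * l2.length + j]? = l2[j]? := by
  by_cases h : b < l2.length
  · rw [pvInnerA]
    simp only [h, dif_pos, PySem.List.pyGet?_natCast]
    by_cases hm : l1[a * l2.length + b]? = l2[b]?
    · rw [if_neg (by simp [hm])]
      rw [pvInnerA_iff]
      constructor
      · intro H j hbj hjn
        rcases Nat.eq_or_lt_of_le hbj with rfl | hlt
        · exact hm
        · exact H j hlt hjn
      · intro H j hbj hjn
        exact H j (Nat.le_of_succ_le hbj) hjn
    · rw [if_pos (by simp [hm])]
      constructor
      · intro H; cases H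
      · intro H; exact absurd (H b le_rfl h) hm
  · rw [pvInnerA]
    simp only [h, dif_neg, not_false_iff, true_iff]
    intro j hbj hjn
    omega
termination_by l2.length - b

-- characterisation of the outer loop
theorem pvOuterA_iff (l1 l2 : List Char) (a : Nat) :
    pvOuterA l1 l2 a = true ↔
      ∀ i, a ≤ i → i < l1.length / l2.length →
        ∀ j, j < l2.length → l1[i * l2.length + j]? = l2[j]? := by
  by_cases h : a < l1.length / l2.length
  · rw [pvOuterA]
    simp only [h, dif_pos]
    by_cases hi : pvInnerA l1 l2 a 0 = false
    · rw [if_pos hi]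
      constructor
      · intro H; cases H
      · intro H
        have : pvInnerA l1 l2 a 0 = true := by
          rw [pvInnerA_iff]
          intro j _ hj
          exact H a le_rfl h j hj
        rw [this] at hi; cases hi
    · rw [if_neg hi]
      rw [pvOuterA_iff]
      have ha : pvInnerA l1 l2 a 0 = true := by
        cases hx : pvInnerA l1 l2 a 0
        · exact absurd hx hi
        · rfl
      rw [pvInnerA_iff] at ha
      constructor
      · intro H i hai hik j hj
        rcases Nat.eq_or_lt_of_le hai with rfl | hlt
        · exact ha j (Nat.zero_le _) hj
        · exact H i hlt hik j hj
      · intro H i hai hik j hj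
        exact H i (Nat.le_of_succ_le hai) hik j hj
  · rw [pvOuterA]
    simp only [h, dif_neg, not_false_iff, true_iff]
    intro i hai hik
    omega
termination_by l1.length / l2.length - a

-- B's repeated list, characterised elementwise
theorem flatten_replicate_getElem? (l2 : List Char) (k i j : Nat)
    (hi : i < k) (hj : j < l2.length) :
    ((List.replicate k l2).flatten)[i * l2.length + j]? = l2[j]? := by
  induction k generalizing i with
  | zero => omega
  | succ k ih =>
    rw [List.replicate_succ, List.flatten_cons]
    cases i with
    | zero =>
      simp only [Nat.zero_mul, Nat.zero_add]
      rw [List.getElem?_append_left hj]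
    | succ i =>
      have : (i + 1) * l2.length + j = l2.length + (i * l2.length + j) := by ring
      rw [this, List.getElem?_append_right (by omega)]
      have : l2.length + (i * l2.length + j) - l2.length = i * l2.length + j := by omega
      rw [this]
      exact ih i (by omega)

theorem flatten_replicate_length (l2 : List Char) (k : Nat) :
    ((List.replicate k l2).flatten).length = k * l2.length := by
  simp [List.length_flatten, List.map_replicate, List.sum_replicate,
        smul_eq_mul]

-- main equality on the underlying lists
theorem main_lists (l1 l2 : List Char) (hn : l2 ≠ []) :
    (if l1.length % l2.length ≠ 0 then false else pvOuterA l1 l2 0)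
      = (l1 == (List.replicate (l1.length / l2.length) l2).flatten) := by
  have hnpos : 0 < l2.length := List.length_pos_iff.mpr hn
  set k := l1.length / l2.length with hk
  by_cases hmod : l1.length % l2.length = 0
  · have hlen : l1.length = k * l2.length :=
      (Nat.div_mul_cancel (Nat.dvd_of_mod_eq_zero hmod)).symm
    have hflen : ((List.replicate k l2).flatten).length = l1.length := by
      rw [flatten_replicate_length, hlen]
    rw [if_neg (by simp [hmod])]
    by_cases heq : l1 = (List.replicate k l2).flatten
    · rw [heq, beq_self_eq_true]
      rw [pvOuterA_iff]
      intro i _ hik j hj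
      rw [hflen, ← hk] at hik
      exact flatten_replicate_getElem? l2 k i j hik hj
    · rw [beq_eq_false_iff_ne.mpr heq]
      cases hO : pvOuterA l1 l2 0
      · rfl
      · exfalso
        apply heq
        apply List.ext_getElem?
        intro n
        by_cases hnlt : n < l1.length
        · have hex : ∃ i j, i < k ∧ j < l2.length ∧ n = i * l2.length + j := by
            refine ⟨n / l2.length, n % l2.length, ?_, Nat.mod_lt _ hnpos, ?_⟩
            · rw [Nat.div_lt_iff_lt_mul hnpos]; omega
            · exact (Nat.div_add_mod' n l2.length).symm
          obtain ⟨i, j, hik, hj, rfl⟩ := hex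
          rw [pvOuterA_iff] at hO
          rw [hO i (Nat.zero_le _) hik j hj]
          exact (flatten_replicate_getElem? l2 k i j hik hj).symm
        · rw [List.getElem?_eq_none (by omega),
              List.getElem?_eq_none (by omega : (List.replicate k l2).flatten.length ≤ n)]
  · rw [if_pos (by simp [hmod])]
    symm
    rw [beq_eq_false_iff_ne]
    intro heq
    have hfl := flatten_replicate_length l2 k
    rw [← heq, hk] at hfl
    have := Nat.div_add_mod' l1.length l2.length
    omega

-- ===== VERDICT (by name: the statement is the Claim_ definition above) =====
theorem Q3SummerB2021_spec : Claim_equal_Q3SummerB2021 := by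
  intro s1 s2 _ hpre
  unfold Spec_Q3SummerB2021 Q3SummerB2021 Q3SummerB2021_alt
  have hn : s2.toList ≠ [] := by
    intro h
    exact hpre (by rwa [String.toList_eq_nil_iff] at h)
  exact main_lists s1.toList s2.toList hn
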